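-- pv_equiv track=rewrite | github.com/hall-lab/svtools | svtools/l_bp.py | trim
-- ===== SOURCE A (Python) =====
-- def trim(A):
--     '''
--     Return offset of first non-zero value from each end of an array
--     '''
--     clip_start = 0
--     for i in range(len(A)):
--         if A[i] == 0:
--             clip_start += 1
--         else:
--             break
--     clip_end = 0
--     for i in range(len(A)-1,-1,-1):
--         if A[i] == 0:
--             clip_end += 1
--         else:
--             break
--     return [clip_start, clip_end]
-- ===== SOURCE B (Python) =====
-- def trim(A):
--     '''
--     Return offset of first non-zero value from each end of an array
--     '''
--     nz = [i for i, x in enumerate(A) if x != 0]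
--     if not nz:
--         return [len(A), len(A)]
--     return [nz[0], len(A) - 1 - nz[-1]]
-- ===== Notes on version B (the rewrite author's own statement) =====
-- stated objective: simpler
-- what changed: Replaced the two directional early-breaking loops with a single forward pass collecting the non-zero indices, from which both clip offsets follow by closed-form arithmetic (length when none, else first index and length minus one minus last index).
import Mathlib
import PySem

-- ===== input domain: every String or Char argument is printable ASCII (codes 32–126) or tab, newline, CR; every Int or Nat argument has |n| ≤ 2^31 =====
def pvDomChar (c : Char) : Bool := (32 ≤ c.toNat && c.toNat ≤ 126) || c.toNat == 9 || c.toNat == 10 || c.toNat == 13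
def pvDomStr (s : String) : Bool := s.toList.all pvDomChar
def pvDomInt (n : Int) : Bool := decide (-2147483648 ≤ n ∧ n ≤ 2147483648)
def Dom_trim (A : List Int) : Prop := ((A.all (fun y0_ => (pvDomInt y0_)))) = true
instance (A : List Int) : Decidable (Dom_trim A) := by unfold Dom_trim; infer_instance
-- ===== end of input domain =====

-- B replaces A's two directional early-breaking loops with one forward pass collecting
-- non-zero indices plus closed-form arithmetic (objective: simpler).

-- ===== PORT A =====
-- A's first loop counts zeros from the front until the first non-zero (break);
-- the second loop does the same over the indices len-1 .. 0, i.e. over the reversed list.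
def trimClip : List Int → Int
  | [] => 0
  | x :: xs => if x = 0 then 1 + trimClip xs else 0

def trim (A : List Int) : List Int :=
  [trimClip A, trimClip A.reverse]

-- ===== PORT B =====
def trim_alt (A : List Int) : List Int :=
  let nz := ((PySem.List.enumerate A 0).filter (fun p => p.2 != 0)).map Prod.fst
  match h : nz with
  | [] => [(A.length : Int), (A.length : Int)]
  | i :: rest => [i, (A.length : Int) - 1 - (i :: rest).getLast (by simp)]

-- ===== PRECONDITION & SPEC =====
def Spec_trim (A : List Int) (out : List Int) : Prop := out = trim_alt A
instance (A : List Int) (out : List Int) : Decidable (Spec_trim A out) := by unfold Spec_trim; infer_instance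

-- ===== CLAIM (what is proved, stated in full; the proofs are below) =====
def Claim_equal_trim : Prop := ∀ (A : List Int), Dom_trim A → Spec_trim A (trim A)

-- ===== LEMMAS AND PROOFS =====

-- nz with a generalized starting index (the port's nz is fAux 0 A)
def fAux (n : Int) (A : List Int) : List Int :=
  ((PySem.List.enumerate A n).filter (fun p => p.2 != 0)).map Prod.fst

theorem fAux_nil (n : Int) : fAux n [] = [] := by simp [fAux, PySem.List.enumerate_nil]

theorem fAux_cons (n : Int) (x : Int) (xs : List Int) :
    fAux n (x :: xs) = (if x = 0 then [] else [n]) ++ fAux (n + 1) xs := by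
  simp [fAux, PySem.List.enumerate_cons]
  by_cases h : x = 0 <;> simp [h]

theorem fAux_append_singleton (n : Int) (xs : List Int) (y : Int) :
    fAux n (xs ++ [y]) = fAux n xs ++ (if y = 0 then [] else [n + xs.length]) := by
  simp [fAux, PySem.List.enumerate_append, PySem.List.enumerate_cons, PySem.List.enumerate_nil]
  by_cases h : y = 0 <;> simp [h]

-- head characterization
theorem head_lemma (xs : List Int) : ∀ n : Int,
    (fAux n xs = [] → trimClip xs = xs.length) ∧
    (∀ i rest, fAux n xs = i :: rest → trimClip xs = i - n) := by
  induction xs with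
  | nil => intro n; simp [fAux_nil, trimClip]
  | cons x xs ih =>
    intro n
    by_cases hx : x = 0
    · constructor
      · intro h
        rw [fAux_cons] at h; simp [hx] at h
        have := (ih (n + 1)).1 h
        simp [trimClip, hx, this]
        omega
      · intro i rest h
        rw [fAux_cons] at h; simp [hx] at h
        have := (ih (n + 1)).2 i rest h
        simp [trimClip, hx, this]
        omega
    · constructor
      · intro h; rw [fAux_cons] at h; simp [hx] at h
      · intro i rest h
        rw [fAux_cons] at h; simp [hx] at h
        simp [trimClip, hx, h.1]

-- tail characterization
theorem tail_lemma (xs : List Int) :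
    ((fAux 0 xs).getLast? = none → trimClip xs.reverse = xs.length) ∧
    (∀ j, (fAux 0 xs).getLast? = some j → trimClip xs.reverse = (xs.length : Int) - 1 - j) := by
  induction xs using List.reverseRecOn with
  | nil => simp [fAux_nil, trimClip]
  | append_singleton xs y ih =>
    by_cases hy : y = 0
    · constructor
      · intro h
        rw [fAux_append_singleton] at h
        simp [hy] at h
        have := ih.1 (by simp [h])
        simp [hy, trimClip, this]
        omega
      · intro j h
        rw [fAux_append_singleton] at h
        simp [hy] at h
        have := ih.2 j (by simp [h])
        simp [hy, trimClip, this]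
        omega
    · constructor
      · intro h
        rw [fAux_append_singleton] at h
        simp [hy] at h
      · intro j h
        rw [fAux_append_singleton] at h
        simp [hy] at h
        simp [trimClip, hy, ← h]

-- ===== VERDICT (by name: the statement is the Claim_ definition above) =====
theorem trim_spec : Claim_equal_trim := by
  intro A _
  unfold Spec_trim trim trim_alt
  have hH := head_lemma A 0
  have hT := tail_lemma A
  simp only
  split
  next h =>
    have h' : fAux 0 A = [] := by simpa [fAux] using h
    have e1 := hH.1 h'
    have e2 := hT.1 (by simp [h'])
    simp [e1, e2]
  next i rest h =>
    have h' : fAux 0 A = i :: rest := by simpa [fAux] using h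
    have e1 : trimClip A = i - 0 := hH.2 i rest h'
    have hne : i :: rest ≠ [] := by simp
    have hlast : (fAux 0 A).getLast? = some ((i :: rest).getLast hne) := by
      rw [h']; exact List.getLast?_eq_some_getLast hne
    have e2 := hT.2 _ hlast
    simp [e1, e2]
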